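-- pv_equiv track=rewrite | github.com/lauradoc/code-challenges | datadog.py | output_prime_nums
-- ===== SOURCE A (Python) =====
-- def output_prime_nums(nums, birthdate):
--
--     # first check to see if num is prime
--     # loop through each num and check to see if it is divisible by a num
--     # between 2 and num and check to see if it includes birthday digit
--     # if yes, add num to result list
--
--     result = []
--
--     for num in nums:
--         if num > 1:
--             for i in range(2, num):
--                 if num % i == 0:
--                     break
--             else:
--                 if str(birthdate) in str(num):
--                     result.append(num)
--
--     return result
-- ===== SOURCE B (Python) =====
-- def _is_prime(n):
--     if n < 2:
--         return False
--     d = 2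
--     while d * d <= n:
--         if n % d == 0:
--             return False
--         d += 1
--     return True
--
--
-- def output_prime_nums(nums, birthdate):
--     bday = str(birthdate)
--     result = []
--     for num in nums:
--         if bday in str(num) and _is_prime(num):
--             result.append(num)
--     return result
-- ===== Notes on version B (the rewrite author's own statement) =====
-- stated objective: faster
-- what changed: Replaces A's trial division over all of 2..num-1 with a helper that stops at sqrt(num), and checks the cheap substring condition before the primality test.
import Mathlib
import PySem

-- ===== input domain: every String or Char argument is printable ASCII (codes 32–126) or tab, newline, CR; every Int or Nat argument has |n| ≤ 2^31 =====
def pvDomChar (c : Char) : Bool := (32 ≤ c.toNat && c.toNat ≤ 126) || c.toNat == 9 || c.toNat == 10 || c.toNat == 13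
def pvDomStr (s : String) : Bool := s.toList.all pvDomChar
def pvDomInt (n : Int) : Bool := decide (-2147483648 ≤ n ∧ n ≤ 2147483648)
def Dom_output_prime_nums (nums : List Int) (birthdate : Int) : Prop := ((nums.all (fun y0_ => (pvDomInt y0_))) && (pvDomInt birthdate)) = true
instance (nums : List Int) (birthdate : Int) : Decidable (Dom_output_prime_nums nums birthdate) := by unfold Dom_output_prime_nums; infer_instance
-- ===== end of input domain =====

-- B replaces A's trial division over all of 2..num-1 with a sqrt-bounded divisor loop (faster), checking the substring first.

-- ===== PORT A =====
-- 'for i in range(2, num): if num % i == 0: break' with the for-else: true iff some i in [2, num) divides num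
def scanDiv (num i : Int) : Bool :=
  if i < num then
    if PySem.Int.mod num i == 0 then true
    else scanDiv num (i + 1)
  else false
termination_by (num - i).toNat

def output_prime_nums (nums : List Int) (birthdate : Int) : List Int :=
  nums.foldl (fun result num =>
    if num > 1 then
      if scanDiv num 2 then
        result
      else if PySem.Str.isIn (PySem.Int.toStr birthdate) (PySem.Int.toStr num) then
        result ++ [num]
      else result
    else result) []

-- ===== PORT B =====
-- while d * d <= n: check divisor, d += 1   (the proof argument only serves termination)
def isPrimeLoop (n d : Int) (hd : 2 ≤ d) : Bool :=
  if _h : d * d ≤ n then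
    if PySem.Int.mod n d == 0 then false
    else isPrimeLoop n (d + 1) (by omega)
  else true
termination_by (n - d).toNat
decreasing_by
  have h2 : 2 * d ≤ d * d := by nlinarith
  omega

def is_prime (n : Int) : Bool :=
  if n < 2 then false else isPrimeLoop n 2 (by norm_num)

def output_prime_nums_alt (nums : List Int) (birthdate : Int) : List Int :=
  let bday := PySem.Int.toStr birthdate
  nums.foldl (fun result num =>
    if PySem.Str.isIn bday (PySem.Int.toStr num) && is_prime num then result ++ [num]
    else result) []

-- ===== PRECONDITION & SPEC =====
def Spec_output_prime_nums (nums : List Int) (birthdate : Int) (out : List Int) : Prop := out = output_prime_nums_alt nums birthdate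
instance (nums : List Int) (birthdate : Int) (out : List Int) : Decidable (Spec_output_prime_nums nums birthdate out) := by unfold Spec_output_prime_nums; infer_instance

-- ===== CLAIM (what is proved, stated in full; the proofs are below) =====
def Claim_equal_output_prime_nums : Prop := ∀ (nums : List Int) (birthdate : Int), Dom_output_prime_nums nums birthdate → Spec_output_prime_nums nums birthdate (output_prime_nums nums birthdate)


-- ===== LEMMAS AND PROOFS =====

-- B's loop finds a divisor iff one exists at or above d (up to the square-root bound)
lemma loop_false_iff (n d : Int) (hd : 2 ≤ d) :
    isPrimeLoop n d hd = false ↔ ∃ e : Int, d ≤ e ∧ e * e ≤ n ∧ PySem.Int.mod n e = 0 := by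
  induction d, hd using isPrimeLoop.induct n with
  | case1 d hd h hm =>
    rw [isPrimeLoop, dif_pos h, if_pos hm]
    exact ⟨fun _ => ⟨d, le_refl d, h, by simpa using hm⟩, fun _ => rfl⟩
  | case2 d hd h hm ih =>
    rw [isPrimeLoop, dif_pos h, if_neg hm, ih]
    constructor
    · rintro ⟨e, he1, he2, he3⟩; exact ⟨e, by omega, he2, he3⟩
    · rintro ⟨e, he1, he2, he3⟩
      refine ⟨e, ?_, he2, he3⟩
      rcases lt_or_eq_of_le he1 with h' | h'
      · omega
      · exfalso; subst h'; simp [he3] at hm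
  | case3 d hd h =>
    rw [isPrimeLoop, dif_neg h]
    constructor
    · intro hc; exact absurd hc (by simp)
    · rintro ⟨e, he1, he2, _⟩
      exfalso
      have : d * d ≤ e * e := by nlinarith
      omega

-- the square-root bound loses no divisors: a divisor in [2, n) yields one with e*e ≤ n
lemma divisor_sqrt_iff (n : Int) (hn : 2 ≤ n) :
    (∃ i : Int, 2 ≤ i ∧ i < n ∧ PySem.Int.mod n i = 0) ↔
      (∃ e : Int, 2 ≤ e ∧ e * e ≤ n ∧ PySem.Int.mod n e = 0) := by
  constructor
  · rintro ⟨i, hi2, hin, him⟩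
    have hdvd : i ∣ n := (PySem.Int.mod_eq_zero_iff_dvd n i).mp him
    obtain ⟨j, hj⟩ := hdvd
    have hipos : 0 < i := by omega
    have hjpos : 0 < j := by nlinarith
    have hj2 : 2 ≤ j := by
      rcases (by omega : j = 1 ∨ 2 ≤ j) with h' | h'
      · exfalso; rw [h', mul_one] at hj; omega
      · exact h'
    rcases le_total i j with hle | hle
    · exact ⟨i, hi2, by nlinarith, him⟩
    · refine ⟨j, hj2, by nlinarith, ?_⟩
      rw [PySem.Int.mod_eq_zero_iff_dvd]
      exact ⟨i, by rw [hj]; ring⟩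
  · rintro ⟨e, he2, hee, hem⟩
    exact ⟨e, he2, by nlinarith, hem⟩

-- A's scan over range(2, n) finds a divisor iff one exists at or above i
lemma scan_true_iff (num i : Int) :
    scanDiv num i = true ↔ ∃ j : Int, i ≤ j ∧ j < num ∧ PySem.Int.mod num j = 0 := by
  induction i using scanDiv.induct num with
  | case1 i h hm =>
    rw [scanDiv, if_pos h, if_pos hm]
    exact ⟨fun _ => ⟨i, le_refl i, h, by simpa using hm⟩, fun _ => rfl⟩
  | case2 i h hm ih =>
    rw [scanDiv, if_pos h, if_neg hm, ih]
    constructor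
    · rintro ⟨j, hj1, hj2, hj3⟩; exact ⟨j, by omega, hj2, hj3⟩
    · rintro ⟨j, hj1, hj2, hj3⟩
      refine ⟨j, ?_, hj2, hj3⟩
      rcases lt_or_eq_of_le hj1 with h' | h'
      · omega
      · exfalso; subst h'; simp [hj3] at hm
  | case3 i h =>
    rw [scanDiv, if_neg h]
    constructor
    · intro hc; exact absurd hc (by simp)
    · rintro ⟨j, hj1, hj2, _⟩; exfalso; omega

-- A's full scan over range(2, n) and B's square-root-bounded test agree
lemma prime_char (n : Int) :
    (decide (1 < n) && !(scanDiv n 2)) = is_prime n := by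
  by_cases h1 : 1 < n
  · have hn : 2 ≤ n := by omega
    unfold is_prime
    rw [if_neg (by omega)]
    simp only [h1, decide_true, Bool.true_and]
    have hany : scanDiv n 2 = true ↔
        ∃ i : Int, 2 ≤ i ∧ i < n ∧ PySem.Int.mod n i = 0 := scan_true_iff n 2
    by_cases hl : isPrimeLoop n 2 (by norm_num) = false
    · rw [hl]
      have : ∃ i : Int, 2 ≤ i ∧ i < n ∧ PySem.Int.mod n i = 0 :=
        (divisor_sqrt_iff n hn).mpr ((loop_false_iff n 2 (by norm_num)).mp hl)
      simp [hany.mpr this]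
    · have hl' : isPrimeLoop n 2 (by norm_num) = true := by
        cases h : isPrimeLoop n 2 (by norm_num) <;> simp_all
      rw [hl']
      have hno : ¬ ∃ i : Int, 2 ≤ i ∧ i < n ∧ PySem.Int.mod n i = 0 := by
        intro hc
        exact hl ((loop_false_iff n 2 (by norm_num)).mpr ((divisor_sqrt_iff n hn).mp hc))
      cases h : scanDiv n 2 with
      | false => rfl
      | true => exact absurd (hany.mp h) hno
  · unfold is_prime
    rw [if_pos (by omega)]
    simp [h1]

-- ===== VERDICT (by name: the statement is the Claim_ definition above) =====
theorem output_prime_nums_spec : Claim_equal_output_prime_nums := by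
  intro nums birthdate _
  unfold Spec_output_prime_nums output_prime_nums output_prime_nums_alt
  dsimp only
  have hfun : (fun (result : List Int) (num : Int) =>
      if num > 1 then
        if scanDiv num 2 then
          result
        else if PySem.Str.isIn (PySem.Int.toStr birthdate) (PySem.Int.toStr num) then
          result ++ [num]
        else result
      else result) =
      (fun (result : List Int) (num : Int) =>
        if PySem.Str.isIn (PySem.Int.toStr birthdate) (PySem.Int.toStr num) && is_prime num then
          result ++ [num]
        else result) := by
    funext r num
    rw [← prime_char num]
    by_cases h1 : 1 < num
    · rw [if_pos (show num > 1 from h1)]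
      simp only [h1, decide_true, Bool.true_and]
      cases hA : scanDiv num 2 with
      | true => simp
      | false => simp
    · rw [if_neg (show ¬ num > 1 from h1)]
      simp [h1]
  rw [hfun]
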